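-- pv_equiv track=rewrite | github.com/siposferenc98/Genome-Sequences | genome_sequences py/main.py | kivalaszt
-- ===== SOURCE A (Python) =====
-- def kivalaszt(perm):
--     minim = 999999
--     for a in perm:
--         elso = a[0]
--         j = 1
--         while j < len(a):
--             i = 0
--             while i < len(elso):
--                 if a[j] in elso:
--                     break
--                 elif elso[i:] == a[j][0:len(elso)-i]:
--                     elso+= a[j][len(elso)-i:]
--                     break
--                 i+=1
--             if i == len(elso):
--                 elso+=a[j]
--             j+=1
--         minim = min(len(elso), minim)
--     return minim
-- ===== SOURCE B (Python) =====
-- def _step(t, f, q, c):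
--     # KMP automaton transition: longest k with t[:k] a suffix of (processed + c)
--     while q and t[q] != c:
--         q = f[q - 1]
--     return q + 1 if t[q] == c else 0
--
-- def _fail(t):
--     # KMP failure function: f[i] = longest proper border of t[:i+1]
--     f = [0]
--     q = 0
--     for c in t[1:]:
--         q = _step(t, f, q, c)
--         f.append(q)
--     return f
--
-- def _absorb(s, t):
--     # run the KMP automaton of t over s: a full match means t is inside s;
--     # otherwise the final state is the maximal suffix/prefix overlap
--     if not t:
--         return s
--     f = _fail(t)
--     q = 0
--     for c in s:
--         q = _step(t, f, q, c)
--         if q == len(t):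
--             return s
--     return s + t[q:]
--
-- def kivalaszt(perm):
--     lengths = [999999]
--     for frags in perm:
--         s = frags[0]
--         for t in frags[1:]:
--             s = _absorb(s, t)
--         lengths.append(len(s))
--     return min(lengths)
-- ===== Notes on version B (the rewrite author's own statement) =====
-- stated objective: faster
-- what changed: A merges each fragment by scanning every cut position i and comparing string slices (plus re-running the substring test inside the loop); B builds the KMP failure function of each fragment and runs the KMP automaton once over the accumulated string, so one linear scan both detects containment and yields the maximal suffix/prefix overlap as the final automaton state.
import Mathlib
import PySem

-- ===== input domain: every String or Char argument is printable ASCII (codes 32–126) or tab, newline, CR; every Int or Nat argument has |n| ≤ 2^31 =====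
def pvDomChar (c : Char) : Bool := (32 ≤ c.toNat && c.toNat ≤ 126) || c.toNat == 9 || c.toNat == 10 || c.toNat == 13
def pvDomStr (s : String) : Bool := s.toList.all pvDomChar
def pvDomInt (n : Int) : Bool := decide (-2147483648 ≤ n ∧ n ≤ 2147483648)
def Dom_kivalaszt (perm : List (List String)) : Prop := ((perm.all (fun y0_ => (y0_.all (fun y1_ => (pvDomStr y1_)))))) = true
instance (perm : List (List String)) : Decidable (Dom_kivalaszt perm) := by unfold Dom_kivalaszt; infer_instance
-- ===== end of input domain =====

-- B replaces A's quadratic cut-position scan (slice comparison at every i, substring test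
-- re-run inside the loop) by the KMP failure-function automaton: one linear scan of each
-- fragment detects containment and yields the maximal suffix/prefix overlap as the final
-- automaton state. Pre_ excludes orderings containing an empty fragment list, on which A
-- raises IndexError.


-- ===== PORT A =====
-- the inner `while i < len(elso)` loop of A: elso is fixed while scanning, the loop either
-- breaks (substring / overlap found, elso possibly extended) or runs i up to len(elso).
-- fuel = len(elso) - i; returns (elso after the loop, i after the loop).
def kivALoop (x : List Char) (elso : List Char) (i : Nat) (fuel : Nat) : List Char × Nat :=
  match fuel with
  | 0 => (elso, i)
  | f + 1 =>
    if i < elso.length then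
      if PySem.Chars.isIn x elso then (elso, i)
      else
        let k := elso.length - i
        if PySem.List.slice elso (some (i : Int)) none = PySem.List.slice x none (some (k : Int)) then
          (elso ++ PySem.List.slice x (some (k : Int)) none, i)
        else kivALoop x elso (i + 1) f
    else (elso, i)

-- the `if i == len(elso): elso += a[j]` after the while loop
def kivAPost (x : List Char) (r : List Char × Nat) : List Char :=
  if r.2 = r.1.length then r.1 ++ x else r.1

def kivAStep (elso x : List Char) : List Char := kivAPost x (kivALoop x elso 0 elso.length)

def kivalaszt (perm : List (List String)) : Int :=
  perm.foldl (fun minim a =>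
    match a with
    | [] => minim  -- Python: a[0] raises IndexError here; excluded by Pre_kivalaszt
    | h :: rest =>
      min (((rest.foldl (fun e x => kivAStep e x.toList) h.toList).length : Int)) minim) 999999

-- ===== PORT B =====
-- B's `_step` while loop `while q and t[q] != c: q = f[q-1]`; fuel bounds the strictly
-- decreasing state q (f[i] ≤ i for a real failure table), so fuel = q is exact.
def kmpWhile (t : List Char) (f : List Nat) (c : Char) : Nat → Nat → Nat
  | 0, q => q
  | fu + 1, q =>
    if q ≠ 0 ∧ t.getD q c ≠ c then kmpWhile t f c fu (f.getD (q - 1) 0) else q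

-- B's `_step`: KMP automaton transition (indices q are < len(t) in every real run,
-- so the getD defaults are never read)
def kmpStep (t : List Char) (f : List Nat) (q : Nat) (c : Char) : Nat :=
  let q' := kmpWhile t f c q q
  if t.getD q' c = c then q' + 1 else 0

-- B's `_fail`: f = [0]; q = 0; for c in t[1:]: q = _step(t, f, q, c); f.append(q)
def kmpFail (t : List Char) : List Nat :=
  match t with
  | [] => []
  | _ :: rest =>
    (rest.foldl (fun (st : List Nat × Nat) c =>
      let q := kmpStep t st.1 st.2 c
      (st.1 ++ [q], q)) ([0], 0)).1

-- B's `_absorb` scan: for c in s: q = _step(..); if q == len(t): return s  (none = matched)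
def kmpScan (t : List Char) (f : List Nat) : List Char → Nat → Option Nat
  | [], q => some q
  | c :: s, q =>
    let q' := kmpStep t f q c
    if q' = t.length then none else kmpScan t f s q'

def kmpAbsorb (s t : List Char) : List Char :=
  if t = [] then s
  else
    match kmpScan t (kmpFail t) s 0 with
    | none => s
    | some q => s ++ PySem.List.slice t (some (q : Int)) none

def kivalaszt_alt (perm : List (List String)) : Int :=
  let lengths := perm.foldl (fun acc frags =>
    match frags with
    | [] => acc  -- frags[0] raises IndexError here; excluded by Pre_kivalaszt
    | h :: rest =>
      acc ++ [((rest.foldl (fun s t => kmpAbsorb s t.toList) h.toList).length : Int)]) [(999999 : Int)]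
  PySem.List.minD lengths (fun v => v) 999999

-- ===== PRECONDITION & SPEC =====
-- Pre_ excludes inputs containing an empty fragment list, on which A raises IndexError at a[0].
def Pre_kivalaszt (perm : List (List String)) : Prop := ∀ a ∈ perm, a ≠ []
instance (perm : List (List String)) : Decidable (Pre_kivalaszt perm) := by
  unfold Pre_kivalaszt; infer_instance
def pvWitness_kivalaszt : List (List String) := [["abcab", "cabd", "bd"], ["bd", "abcab"]]
def Spec_kivalaszt (perm : List (List String)) (out : Int) : Prop := out = kivalaszt_alt perm
instance (perm : List (List String)) (out : Int) : Decidable (Spec_kivalaszt perm out) := by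
  unfold Spec_kivalaszt; infer_instance

-- ===== CLAIM (what is proved, stated in full; the proofs are below) =====
def Claim_equal_kivalaszt : Prop :=
  ∀ (perm : List (List String)), Dom_kivalaszt perm → Pre_kivalaszt perm →
    Spec_kivalaszt perm (kivalaszt perm)

-- ===== LEMMAS AND PROOFS =====

-- the maximal overlap length ≤ n: largest k ≤ n with t.take k a suffix of s, else 0
def maxOv (s t : List Char) : Nat → Nat
  | 0 => 0
  | n + 1 => if t.take (n + 1) <:+ s then n + 1 else maxOv s t n

lemma maxOv_ge (s t : List Char) {k : Nat} (hk : t.take k <:+ s) :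
    ∀ {n : Nat}, k ≤ n → k ≤ maxOv s t n := by
  intro n
  induction n with
  | zero => intro h; omega
  | succ m ih =>
    intro h
    rw [maxOv]
    by_cases hs : t.take (m + 1) <:+ s
    · simp [hs]; omega
    · have hk' : k ≠ m + 1 := by rintro rfl; exact hs hk
      simpa [hs] using ih (by omega)

lemma maxOv_le_of (s t : List Char) (k₀ : Nat)
    (h : ∀ k, k₀ < k → k ≤ n → ¬ t.take k <:+ s) : maxOv s t n ≤ k₀ := by
  induction n with
  | zero => simp [maxOv]
  | succ m ih =>
    rw [maxOv]
    by_cases hs : t.take (m + 1) <:+ s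
    · simp only [hs, if_true]
      by_contra hlt
      exact h (m + 1) (by omega) (le_refl _) hs
    · simp only [hs, if_false]
      exact ih (fun k h1 h2 => h k h1 (by omega))

lemma maxOv_eq_zero (s t : List Char) (n : Nat)
    (h : ∀ k, 1 ≤ k → k ≤ n → ¬ t.take k <:+ s) : maxOv s t n = 0 :=
  Nat.le_zero.mp (maxOv_le_of s t 0 (fun k h1 h2 => h k (by omega) h2))

lemma maxOv_le (s t : List Char) (n : Nat) : maxOv s t n ≤ n := by
  induction n with
  | zero => simp [maxOv]
  | succ m ih =>
    rw [maxOv]; split_ifs with h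
    · exact le_refl _
    · omega

lemma maxOv_suffix (s t : List Char) (n : Nat) : t.take (maxOv s t n) <:+ s := by
  induction n with
  | zero => simp [maxOv]
  | succ m ih =>
    rw [maxOv]; split_ifs with h
    · exact h
    · exact ih

-- A's cut condition at position i ↔ the overlap of length (len s - i) works
lemma condA_iff (s t : List Char) (i : Nat) (hi : i < s.length) :
    s.drop i = t.take (s.length - i) ↔
      (s.length - i ≤ t.length ∧ t.take (s.length - i) <:+ s) := by
  constructor
  · intro h
    have hlen : (t.take (s.length - i)).length = s.length - i := by
      rw [← h, List.length_drop]
    rw [List.length_take] at hlen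
    refine ⟨by omega, ?_⟩
    rw [← h]; exact List.drop_suffix i s
  · rintro ⟨hle, hsuf⟩
    have hlen : (t.take (s.length - i)).length = s.length - i := by
      rw [List.length_take]; omega
    rw [List.suffix_iff_eq_drop] at hsuf
    rw [hsuf, hlen]
    congr 1; omega

-- the A-loop (substring test already failed) lands on the maximal overlap
lemma kivALoop_spec (s t : List Char) (hin : PySem.Chars.isIn t s = false) :
    ∀ (fuel i : Nat), i + fuel = s.length →
      (∀ k, s.length - i < k → k ≤ min s.length t.length → ¬ t.take k <:+ s) →
      kivAPost t (kivALoop t s i fuel) = s ++ t.drop (maxOv s t (min s.length t.length)) := by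
  intro fuel
  induction fuel with
  | zero =>
    intro i hif h
    have hi : i = s.length := by omega
    rw [kivALoop, kivAPost]
    simp only [hi, if_pos]
    rw [maxOv_eq_zero s t _ (fun k h1 h2 => h k (by omega) h2), List.drop_zero]
  | succ f ih =>
    intro i hif h
    have hi : i < s.length := by omega
    rw [kivALoop]
    simp only [if_pos hi, hin, Bool.false_eq_true, if_false]
    rw [PySem.List.slice_from_natCast, PySem.List.slice_to_natCast, PySem.List.slice_from_natCast]
    by_cases hc : s.drop i = t.take (s.length - i)
    · rw [if_pos hc, kivAPost]
      obtain ⟨hle, hsuf⟩ := (condA_iff s t i hi).mp hc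
      have hmax : maxOv s t (min s.length t.length) = s.length - i := by
        have h1 : s.length - i ≤ maxOv s t (min s.length t.length) :=
          maxOv_ge s t hsuf (by omega)
        have h2 : maxOv s t (min s.length t.length) ≤ s.length - i :=
          maxOv_le_of s t _ h
        omega
      have hne : i ≠ (s ++ t.drop (s.length - i)).length := by
        rw [List.length_append]; omega
      rw [if_neg hne, hmax]
    · rw [if_neg hc]
      refine ih (i + 1) (by omega) ?_
      intro k h1 h2 hsuf
      by_cases hk : s.length - i < k
      · exact h k hk h2 hsuf
      · have hkeq : k = s.length - i := by omega
        subst hkeq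
        exact hc ((condA_iff s t i hi).mpr ⟨by omega, hsuf⟩)

-- A's merge step, characterised: keep s on containment, else append past the maximal overlap
lemma kivAStep_char (s t : List Char) :
    kivAStep s t =
      if t ≠ [] ∧ PySem.Chars.isIn t s = true then s
      else s ++ t.drop (maxOv s t (min s.length t.length)) := by
  by_cases hs : s = []
  · subst hs
    have hA : kivAStep [] t = t := by simp [kivAStep, kivALoop, kivAPost]
    rw [hA]
    by_cases ht : t = []
    · subst ht; simp [maxOv]
    · have hcond : ¬ (t ≠ [] ∧ PySem.Chars.isIn t [] = true) := by
        rintro ⟨h1, h2⟩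
        exact h1 (List.infix_nil.mp ((PySem.Chars.isIn_iff_infix t []).mp h2))
      rw [if_neg hcond]
      simp [maxOv]
  · by_cases hin : PySem.Chars.isIn t s = true
    · have hA : kivAStep s t = s := by
        obtain ⟨m, hm⟩ : ∃ m, s.length = m + 1 := by
          cases hl : s.length with
          | zero => exact absurd (List.length_eq_zero_iff.mp hl) hs
          | succ m => exact ⟨m, rfl⟩
        rw [kivAStep, hm, kivALoop]
        have h0 : ¬ ((0 : Nat) = s.length) := by omega
        rw [if_pos (by omega : 0 < s.length), if_pos hin, kivAPost, if_neg h0]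
      rw [hA]
      by_cases ht : t = []
      · subst ht; rw [if_neg (by simp)]; simp
      · rw [if_pos ⟨ht, hin⟩]
    · have hin' : PySem.Chars.isIn t s = false := by
        cases h : PySem.Chars.isIn t s <;> simp_all
      rw [kivAStep,
        kivALoop_spec s t hin' s.length 0 (by omega)
          (fun k h1 h2 => absurd (by omega : k ≤ s.length) (by omega))]
      rw [if_neg (by rintro ⟨_, h⟩; exact hin h)]

-- ---- KMP correctness ----

def FailOk (t : List Char) (F : List Nat) : Prop :=
  ∀ i, i < F.length → F.getD i 0 = maxOv (t.take (i + 1)) t i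

lemma failOk_le {t : List Char} {F : List Nat} (h : FailOk t F) {i : Nat}
    (hi : i < F.length) : F.getD i 0 ≤ i := by
  rw [h i hi]; exact maxOv_le _ _ _

lemma suffix_of_suffix_le {a b s : List Char} (ha : a <:+ s) (hb : b <:+ s)
    (h : a.length ≤ b.length) : a <:+ b := by
  have := List.prefix_of_prefix_length_le (List.reverse_prefix.mpr ha)
    (List.reverse_prefix.mpr hb) (by simpa)
  exact List.reverse_prefix.mp this

lemma concat_suffix_concat {a p : List Char} {x c : Char} :
    a ++ [x] <:+ p ++ [c] ↔ x = c ∧ a <:+ p := by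
  rw [← List.reverse_prefix, List.reverse_append, List.reverse_append]
  simp [List.cons_prefix_cons]

lemma take_succ_getD (t : List Char) (n : Nat) (d : Char) (h : n < t.length) :
    t.take (n + 1) = t.take n ++ [t.getD n d] := by
  rw [List.take_add_one]
  simp [List.getD, List.getElem?_eq_getElem h]

lemma suffix_append_ch {a b : List Char} (c : Char) (h : a <:+ b) :
    a ++ [c] <:+ b ++ [c] := by
  obtain ⟨u, rfl⟩ := h; exact ⟨u, by simp⟩

-- extending the scanned text by one character: the new maximal overlap only depends on the
-- old one (the back-off chain); core invariant of both KMP phases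
lemma maxOv_ext (t p : List Char) (c : Char) (nA q : Nat)
    (hnA : nA ≤ t.length) (hqt : q < t.length)
    (hsuf : t.take q <:+ p)
    (hdom : ∀ k, k < nA → t.take k <:+ p → t.getD k c = c → k ≤ q)
    (hlb : q + 1 ≤ nA) :
    maxOv (p ++ [c]) t nA = maxOv (t.take q ++ [c]) t (q + 1) := by
  apply Nat.le_antisymm
  · rcases Nat.eq_zero_or_pos (maxOv (p ++ [c]) t nA) with h0 | hpos
    · rw [h0]; exact Nat.zero_le _
    · set m1 := maxOv (p ++ [c]) t nA with hm1
      have hsm : t.take m1 <:+ p ++ [c] := maxOv_suffix _ _ _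
      have hm1n : m1 ≤ nA := maxOv_le _ _ _
      have hm1t : m1 ≤ t.length := le_trans hm1n hnA
      have hdec : t.take m1 = t.take (m1 - 1) ++ [t.getD (m1 - 1) c] := by
        have h1 : m1 - 1 < t.length := by omega
        have h2 := take_succ_getD t (m1 - 1) c h1
        rw [← h2]; congr 1; omega
      rw [hdec] at hsm
      obtain ⟨hx, hs⟩ := concat_suffix_concat.mp hsm
      have hk : m1 - 1 ≤ q := hdom (m1 - 1) (by omega) hs hx
      have hss : t.take (m1 - 1) <:+ t.take q :=
        suffix_of_suffix_le hs hsuf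
          (by simp only [List.length_take]; omega)
      have hfin : t.take m1 <:+ t.take q ++ [c] := by
        rw [hdec, hx]; exact suffix_append_ch c hss
      exact maxOv_ge (t.take q ++ [c]) t hfin (by omega)
  · rcases Nat.eq_zero_or_pos (maxOv (t.take q ++ [c]) t (q + 1)) with h0 | hpos
    · rw [h0]; exact Nat.zero_le _
    · set m2 := maxOv (t.take q ++ [c]) t (q + 1) with hm2
      have hsm : t.take m2 <:+ t.take q ++ [c] := maxOv_suffix _ _ _
      have hm2n : m2 ≤ q + 1 := maxOv_le _ _ _
      have hm2t : m2 ≤ t.length := by omega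
      have hdec : t.take m2 = t.take (m2 - 1) ++ [t.getD (m2 - 1) c] := by
        have h1 : m2 - 1 < t.length := by omega
        have h2 := take_succ_getD t (m2 - 1) c h1
        rw [← h2]; congr 1; omega
      rw [hdec] at hsm
      obtain ⟨hx, hs⟩ := concat_suffix_concat.mp hsm
      have hsp : t.take (m2 - 1) <:+ p := hs.trans hsuf
      have hfin : t.take m2 <:+ p ++ [c] := by
        rw [hdec, hx]; exact suffix_append_ch c hsp
      exact maxOv_ge (p ++ [c]) t hfin (by omega)

lemma kmpWhile_fuel (t : List Char) (F : List Nat) (c : Char) (hF : FailOk t F) :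
    ∀ f1 f2 q, q ≤ f1 → q ≤ f2 → q ≤ F.length →
      kmpWhile t F c f1 q = kmpWhile t F c f2 q := by
  intro f1
  induction f1 with
  | zero =>
    intro f2 q h1 _ _
    have hq : q = 0 := by omega
    subst hq
    cases f2 with
    | zero => rfl
    | succ g2 => rw [kmpWhile, kmpWhile, if_neg (by simp)]
  | succ g ih =>
    intro f2 q h1 h2 h3
    by_cases hc : q ≠ 0 ∧ t.getD q c ≠ c
    · have hq1 : 1 ≤ q := Nat.pos_of_ne_zero hc.1
      cases f2 with
      | zero => omega
      | succ g2 =>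
        rw [kmpWhile, kmpWhile, if_pos hc, if_pos hc]
        have hlt : F.getD (q - 1) 0 ≤ q - 1 := failOk_le hF (by omega)
        exact ih _ _ (by omega) (by omega) (by omega)
    · cases f2 with
      | zero =>
        have hq : q = 0 := by omega
        subst hq
        rw [kmpWhile, kmpWhile, if_neg hc]
      | succ g2 => rw [kmpWhile, kmpWhile, if_neg hc, if_neg hc]

lemma kmpStep_spec (t : List Char) (F : List Nat) (hF : FailOk t F) (c : Char) :
    ∀ q, q < t.length → q ≤ F.length →
      kmpStep t F q c = maxOv (t.take q ++ [c]) t (q + 1) := by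
  intro q
  induction q using Nat.strong_induction_on with
  | _ q ih =>
    intro hqt hqF
    by_cases hc : q ≠ 0 ∧ t.getD q c ≠ c
    · have hq1 : 1 ≤ q := Nat.pos_of_ne_zero hc.1
      have hq2 : F.getD (q - 1) 0 = maxOv (t.take q) t (q - 1) := by
        have h := hF (q - 1) (by omega)
        rwa [show q - 1 + 1 = q by omega] at h
      have hq2le : F.getD (q - 1) 0 ≤ q - 1 := by
        rw [hq2]; exact maxOv_le _ _ _
      have hunf : kmpWhile t F c q q = kmpWhile t F c (F.getD (q - 1) 0) (F.getD (q - 1) 0) := by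
        obtain ⟨m, rfl⟩ : ∃ m, q = m + 1 := ⟨q - 1, by omega⟩
        rw [kmpWhile, if_pos hc]
        exact kmpWhile_fuel t F c hF m _ _ (by omega) le_rfl (by omega)
      have hstep : kmpStep t F q c = kmpStep t F (F.getD (q - 1) 0) c := by
        rw [kmpStep, kmpStep, hunf]
      rw [hstep, ih _ (by omega) (by omega) (by omega)]
      refine (maxOv_ext t (t.take q) c (q + 1) (F.getD (q - 1) 0)
        (by omega) (by omega) ?_ ?_ (by omega)).symm
      · rw [hq2]; exact maxOv_suffix _ _ _
      · intro k hk hks hkc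
        have hkq : k ≠ q := by rintro rfl; exact hc.2 hkc
        rw [hq2]; exact maxOv_ge _ _ hks (by omega)
    · have hwh : kmpWhile t F c q q = q := by
        cases q with
        | zero => rfl
        | succ m => rw [kmpWhile, if_neg hc]
      rw [kmpStep]
      simp only [hwh]
      by_cases hgc : t.getD q c = c
      · rw [if_pos hgc]
        have hsuf : t.take (q + 1) <:+ t.take q ++ [c] := by
          rw [take_succ_getD t q c hqt, hgc]
        rw [maxOv, if_pos hsuf]
      · rw [if_neg hgc]
        have hq0 : q = 0 := by
          by_contra h0
          exact hc ⟨h0, hgc⟩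
        subst hq0
        simp only [List.take_zero, List.nil_append]
        rw [maxOv]
        rw [if_neg ?_]
        · rfl
        · intro hsuf
          have h1 : t.take 1 = [t.getD 0 c] := by
            have := take_succ_getD t 0 c hqt
            simpa using this
          rw [h1] at hsuf
          have : t.getD 0 c = c ∧ ([] : List Char) <:+ [] := by
            have h2 : ([] : List Char) ++ [t.getD 0 c] <:+ [] ++ [c] := by simpa using hsuf
            exact concat_suffix_concat.mp h2
          exact hgc this.1

lemma getD_append_lt (F : List Nat) (q : Nat) {j : Nat} (h : j < F.length) :
    (F ++ [q]).getD j 0 = F.getD j 0 := by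
  simp [List.getD, List.getElem?_append_left h]

lemma getD_append_last (F : List Nat) (q : Nat) :
    (F ++ [q]).getD F.length 0 = q := by
  simp [List.getD]

-- invariant of the failure-table fold: the table built so far is correct and the carried
-- state is its last entry
lemma kmpFail_inv (t : List Char) :
    ∀ (l : List Char) (F : List Nat) (i : Nat),
      l = t.drop (i + 1) → F.length = i + 1 → i + 1 ≤ t.length → FailOk t F →
      ((l.foldl (fun (st : List Nat × Nat) c =>
          let q := kmpStep t st.1 st.2 c
          (st.1 ++ [q], q)) (F, F.getD i 0)).1.length = t.length ∧
       FailOk t ((l.foldl (fun (st : List Nat × Nat) c =>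
          let q := kmpStep t st.1 st.2 c
          (st.1 ++ [q], q)) (F, F.getD i 0)).1)) := by
  intro l
  induction l with
  | nil =>
    intro F i hl hFl hle hF
    have : t.length ≤ i + 1 := List.drop_eq_nil_iff.mp hl.symm
    simp only [List.foldl_nil]
    exact ⟨by omega, hF⟩
  | cons c l' ih =>
    intro F i hl hFl hle hF
    have hi1 : i + 1 < t.length := by
      by_contra h
      have : t.drop (i + 1) = [] := List.drop_eq_nil_iff.mpr (by omega)
      rw [this] at hl; simp at hl
    have hgetc : t.getD (i + 1) c = c := by
      have h0 : t[i + 1]? = some c := by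
        have h1 : (t.drop (i + 1))[0]? = some c := by rw [← hl]; rfl
        rw [List.getElem?_drop] at h1
        simpa using h1
      simp [List.getD, h0]
    have hq : F.getD i 0 = maxOv (t.take (i + 1)) t i := hF i (by omega)
    have hqle : F.getD i 0 ≤ i := by rw [hq]; exact maxOv_le _ _ _
    have hstep : kmpStep t F (F.getD i 0) c = maxOv (t.take (i + 2)) t (i + 1) := by
      rw [kmpStep_spec t F hF c _ (by omega) (by omega)]
      have hext := maxOv_ext t (t.take (i + 1)) c (i + 1) (F.getD i 0)
        (by omega) (by omega)
        (by rw [hq]; exact maxOv_suffix _ _ _)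
        (by intro k hk hks _; rw [hq]; exact maxOv_ge _ _ hks (by omega))
        (by omega)
      have h2 : t.take (i + 2) = t.take (i + 1) ++ [c] := by
        rw [show i + 2 = (i + 1) + 1 by omega, take_succ_getD t (i + 1) c hi1, hgetc]
      rw [← hext, h2]
    simp only [List.foldl_cons]
    have hF' : FailOk t (F ++ [kmpStep t F (F.getD i 0) c]) := by
      intro j hj
      rw [List.length_append, List.length_singleton] at hj
      by_cases hjF : j < F.length
      · rw [getD_append_lt F _ hjF]; exact hF j hjF
      · have hjeq : j = F.length := by omega
        subst hjeq
        rw [getD_append_last, hstep, hFl]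
    have hlast : (F ++ [kmpStep t F (F.getD i 0) c]).getD (i + 1) 0
        = kmpStep t F (F.getD i 0) c := by
      rw [← hFl]; exact getD_append_last F _
    have hl' : l' = t.drop (i + 2) := by
      have := congrArg List.tail hl
      simpa [List.tail_drop] using this
    have := ih (F ++ [kmpStep t F (F.getD i 0) c]) (i + 1) hl'
      (by simp [hFl]) (by omega) hF'
    rw [hlast] at this
    exact this

lemma kmpFail_build (t : List Char) (h : t ≠ []) :
    (kmpFail t).length = t.length ∧ FailOk t (kmpFail t) := by
  match t, h with
  | h0 :: rest, _ =>
    have hF0 : FailOk (h0 :: rest) [0] := by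
      intro j hj
      have hj0 : j = 0 := by simpa using hj
      subst hj0
      rfl
    have := kmpFail_inv (h0 :: rest) rest [0] 0 rfl rfl (by simp) hF0
    simpa [kmpFail] using this

lemma infix_to_prefix {t p : List Char} (h : t <:+: p) : ∃ u, u <+: p ∧ t <:+ u := by
  obtain ⟨a, b, rfl⟩ := h
  exact ⟨a ++ t, ⟨b, by simp⟩, ⟨a, rfl⟩⟩

lemma kmpScan_spec (t : List Char) (F : List Nat)
    (hF : FailOk t F) (hFl : F.length = t.length) :
    ∀ (s p : List Char) (q : Nat),
      q = maxOv p t (min p.length t.length) → q < t.length →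
      (∀ p', p' <+: p → ¬ t <:+ p') →
      kmpScan t F s q =
        if t <:+: (p ++ s) then none
        else some (maxOv (p ++ s) t (min (p ++ s).length t.length)) := by
  intro s
  induction s with
  | nil =>
    intro p q hq hqt hpref
    have hninf : ¬ t <:+: (p ++ []) := by
      rw [List.append_nil]
      intro hinf
      obtain ⟨u, hu, hsu⟩ := infix_to_prefix hinf
      exact hpref u hu hsu
    rw [kmpScan, if_neg hninf, List.append_nil, hq]
  | cons c s' ih =>
    intro p q hq hqt hpref
    have hqmin : q ≤ min p.length t.length := by rw [hq]; exact maxOv_le _ _ _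
    have hq2 : kmpStep t F q c = maxOv (p ++ [c]) t (min (p ++ [c]).length t.length) := by
      rw [kmpStep_spec t F hF c q hqt (by omega)]
      have hext := maxOv_ext t p c (min (p.length + 1) t.length) q
        (by omega) hqt
        (by rw [hq]; exact maxOv_suffix _ _ _)
        (by
          intro k hk hks _
          have hkt : k < t.length := by omega
          have hkp : k ≤ p.length := by
            have := hks.length_le
            rw [List.length_take] at this
            omega
          rw [hq]
          exact maxOv_ge _ _ hks (by omega))
        (by omega)
      rw [← hext]
      congr 1
      simp
    rw [kmpScan]
    simp only [hq2]
    by_cases hm : maxOv (p ++ [c]) t (min (p ++ [c]).length t.length) = t.length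
    · rw [if_pos hm]
      have hsuf : t <:+ p ++ [c] := by
        have := maxOv_suffix (p ++ [c]) t (min (p ++ [c]).length t.length)
        rwa [hm, List.take_length] at this
      have hinf : t <:+: (p ++ c :: s') := by
        obtain ⟨u, hu⟩ := hsuf
        refine ⟨u, s', ?_⟩
        have : (u ++ t) ++ s' = (p ++ [c]) ++ s' := by rw [hu]
        simpa using this
      rw [if_pos hinf]
    · rw [if_neg hm]
      have hlt : maxOv (p ++ [c]) t (min (p ++ [c]).length t.length) < t.length := by
        have := maxOv_le (p ++ [c]) t (min (p ++ [c]).length t.length)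
        omega
      have hpref' : ∀ p', p' <+: p ++ [c] → ¬ t <:+ p' := by
        intro p' hp' ht'
        rcases List.prefix_concat_iff.mp hp' with heq | hppre
        · subst heq
          have hts : t.take t.length <:+ p ++ [c] := by rw [List.take_length]; exact ht'
          have hlen : t.length ≤ (p ++ [c]).length := ht'.length_le
          have := maxOv_ge (p ++ [c]) t hts
            (show t.length ≤ min (p ++ [c]).length t.length by omega)
          omega
        · exact hpref p' hppre ht'
      rw [ih (p ++ [c]) _ rfl hlt hpref']
      have hassoc : (p ++ [c]) ++ s' = p ++ c :: s' := by simp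
      rw [hassoc]

-- B's merge step matches the same characterisation
lemma kmpAbsorb_char (s t : List Char) :
    kmpAbsorb s t =
      if t ≠ [] ∧ PySem.Chars.isIn t s = true then s
      else s ++ t.drop (maxOv s t (min s.length t.length)) := by
  by_cases ht : t = []
  · subst ht
    rw [kmpAbsorb, if_pos rfl, if_neg (by simp)]
    simp [maxOv]
  · rw [kmpAbsorb, if_neg ht]
    obtain ⟨hlen, hFok⟩ := kmpFail_build t ht
    have h0 : (0 : Nat) = maxOv ([] : List Char) t (min ([] : List Char).length t.length) := by
      simp [maxOv]
    have hpref : ∀ p', p' <+: ([] : List Char) → ¬ t <:+ p' := by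
      intro p' hp' hs'
      rw [List.prefix_nil.mp hp'] at hs'
      exact ht (List.suffix_nil.mp hs')
    have hscan := kmpScan_spec t (kmpFail t) hFok hlen s [] 0 h0
      (by cases t with | nil => exact absurd rfl ht | cons a l => simp) hpref
    simp only [List.nil_append] at hscan
    rw [hscan]
    by_cases hin : t <:+: s
    · simp only [hin, if_pos]
      rw [if_pos ⟨ht, (PySem.Chars.isIn_iff_infix t s).mpr hin⟩]
    · simp only [hin, if_false]
      rw [if_neg (by rintro ⟨_, h⟩; exact hin ((PySem.Chars.isIn_iff_infix t s).mp h))]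
      rw [PySem.List.slice_from_natCast]

-- the merge steps of A and B agree on every pair of strings
lemma step_eq (s t : List Char) : kivAStep s t = kmpAbsorb s t := by
  rw [kivAStep_char, kmpAbsorb_char]

-- min over the collected list (B) = the running min (A)
lemma min_list_eq (l : List Int) :
    PySem.List.minD ((999999 : Int) :: l) (fun v => v) 999999 = l.foldl min 999999 := by
  rw [PySem.List.minD, PySem.List.min?_id_cons]
  rfl

-- ===== VERDICT (by name: the statement is the Claim_ definition above) =====
theorem kivalaszt_spec : Claim_equal_kivalaszt := by
  intro perm _ hpre
  unfold Spec_kivalaszt kivalaszt kivalaszt_alt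
  -- name B's per-ordering merged length
  set g : List String → Int := fun a =>
    match a with
    | [] => 0
    | h :: rest => ((rest.foldl (fun s t => kmpAbsorb s t.toList) h.toList).length : Int)
    with hg
  -- A's fold = running min over g
  rw [PySem.List.foldl_congr_mem perm _ (fun minim a => min (g a) minim) 999999 ?_]
  · -- B's fold = [999999] ++ map g
    rw [PySem.List.foldl_congr_mem perm _ (fun acc frags => acc ++ [g frags]) [(999999 : Int)] ?_]
    · rw [PySem.List.foldl_append_singleton_eq_map]
      simp only [List.singleton_append]
      rw [min_list_eq, List.foldl_map]
      exact PySem.List.foldl_congr_mem perm _ _ 999999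
        (fun acc x _ => min_comm (g x) acc)
    · intro acc a ha
      cases a with
      | nil => exact absurd rfl (hpre [] ha)
      | cons h rest => simp [hg]
  · intro acc a ha
    cases a with
    | nil => exact absurd rfl (hpre [] ha)
    | cons h rest =>
      simp only [hg]
      rw [PySem.List.foldl_congr_mem rest _ _ h.toList
        (fun e x _ => step_eq e x.toList)]
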